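-- pv_equiv track=rewrite | github.com/PR-CYBR/PR-CYBR-P0D | scripts/generate_code_names.py | generate_symbol_pool
-- ===== SOURCE A (Python) =====
-- from typing import List, Dict, Tuple
--
-- SYMBOL_SETS = {
--     "encryption": [
--         "CIPHER", "ENCRYPT", "HASH", "TOKEN", "KEY", "SALT",
--         "AES", "RSA", "TLS", "SSL", "PKI", "CERT"
--     ],
--     "security": [
--         "FIREWALL", "SHIELD", "GUARD", "SENTINEL", "BASTION", "FORTRESS",
--         "AEGIS", "BARRIER", "DEFENSE", "PATROL", "WATCH", "VAULT"
--     ],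
--     "attack": [
--         "BREACH", "EXPLOIT", "PAYLOAD", "VECTOR", "MALWARE", "PHISH",
--         "TROJAN", "WORM", "ROOTKIT", "BACKDOOR", "INJECT", "OVERFLOW"
--     ],
--     "network": [
--         "PACKET", "ROUTER", "GATEWAY", "PROXY", "TUNNEL", "BRIDGE",
--         "NODE", "MESH", "FABRIC", "LINK", "HUB", "SWITCH"
--     ],
--     "data": [
--         "STREAM", "BUFFER", "CACHE", "QUEUE", "STACK", "HEAP",
--         "BLOCK", "CHUNK", "SHARD", "FRAME", "SEGMENT", "BYTE"
--     ],
--     "protocol": [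
--         "HTTP", "TCP", "UDP", "DNS", "DHCP", "FTP",
--         "SMTP", "SSH", "SNMP", "ICMP", "BGP", "OSPF"
--     ],
--     "operation": [
--         "SCAN", "PROBE", "TRACE", "QUERY", "FETCH", "PUSH",
--         "PULL", "MERGE", "FORK", "CLONE", "PATCH", "BUILD"
--     ],
--     "status": [
--         "ACTIVE", "IDLE", "READY", "ARMED", "ALERT", "LOCKED",
--         "SECURE", "OPEN", "CLOSED", "PENDING", "LIVE", "STANDBY"
--     ]
-- }
--
-- def generate_symbol_pool(seasons: int, episodes_per_season: int) -> List[str]: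
--     """
--     Generate a pool of unique symbols for all episodes.
--
--     Args:
--         seasons: Number of seasons
--         episodes_per_season: Episodes per season
--
--     Returns:
--         List of symbol names
--     """
--     total_episodes = seasons * episodes_per_season
--     symbol_pool = []
--
--     # Flatten all symbols into a single list
--     all_symbols = []
--     for category_symbols in SYMBOL_SETS.values():
--         all_symbols.extend(category_symbols)
--
--     # Remove duplicates and sort
--     all_symbols = sorted(set(all_symbols))
--
--     # If we need more symbols than available, reuse with numeric suffixes
--     if total_episodes > len(all_symbols):
--         for i in range(total_episodes):
--             base_symbol = all_symbols[i % len(all_symbols)]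
--             suffix_num = i // len(all_symbols)
--             if suffix_num > 0:
--                 symbol_pool.append(f"{base_symbol}{suffix_num}")
--             else:
--                 symbol_pool.append(base_symbol)
--     else:
--         symbol_pool = all_symbols[:total_episodes]
--
--     return symbol_pool
-- ===== SOURCE B (Python) =====
-- from typing import List
--
-- SYMBOL_SETS = {
--     "encryption": [
--         "CIPHER", "ENCRYPT", "HASH", "TOKEN", "KEY", "SALT",
--         "AES", "RSA", "TLS", "SSL", "PKI", "CERT"
--     ],
--     "security": [
--         "FIREWALL", "SHIELD", "GUARD", "SENTINEL", "BASTION", "FORTRESS",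
--         "AEGIS", "BARRIER", "DEFENSE", "PATROL", "WATCH", "VAULT"
--     ],
--     "attack": [
--         "BREACH", "EXPLOIT", "PAYLOAD", "VECTOR", "MALWARE", "PHISH",
--         "TROJAN", "WORM", "ROOTKIT", "BACKDOOR", "INJECT", "OVERFLOW"
--     ],
--     "network": [
--         "PACKET", "ROUTER", "GATEWAY", "PROXY", "TUNNEL", "BRIDGE",
--         "NODE", "MESH", "FABRIC", "LINK", "HUB", "SWITCH"
--     ],
--     "data": [
--         "STREAM", "BUFFER", "CACHE", "QUEUE", "STACK", "HEAP",
--         "BLOCK", "CHUNK", "SHARD", "FRAME", "SEGMENT", "BYTE"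
--     ],
--     "protocol": [
--         "HTTP", "TCP", "UDP", "DNS", "DHCP", "FTP",
--         "SMTP", "SSH", "SNMP", "ICMP", "BGP", "OSPF"
--     ],
--     "operation": [
--         "SCAN", "PROBE", "TRACE", "QUERY", "FETCH", "PUSH",
--         "PULL", "MERGE", "FORK", "CLONE", "PATCH", "BUILD"
--     ],
--     "status": [
--         "ACTIVE", "IDLE", "READY", "ARMED", "ALERT", "LOCKED",
--         "SECURE", "OPEN", "CLOSED", "PENDING", "LIVE", "STANDBY"
--     ]
-- }
--
--
-- def generate_symbol_pool(seasons: int, episodes_per_season: int) -> List[str]: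
--     """Round-by-round construction instead of a flat i%n / i//n loop."""
--     total = seasons * episodes_per_season
--     all_symbols = sorted({s for syms in SYMBOL_SETS.values() for s in syms})
--     n = len(all_symbols)
--     if total <= n:
--         return all_symbols[:total]
--     full_rounds = total // n          # >= 1 here
--     rem = total % n
--     pool = list(all_symbols)          # round 0: bare symbols
--     for r in range(1, full_rounds):   # full suffixed rounds
--         pool.extend(s + str(r) for s in all_symbols)
--     pool.extend(s + str(full_rounds) for s in all_symbols[:rem])
--     return pool
-- ===== Notes on version B (the rewrite author's own statement) =====
-- stated objective: alternative
-- what changed: Replaces A's single flat loop over range(total) with i%n indexing and i//n suffix arithmetic by a round-by-round construction: the bare symbol list for round 0, whole suffixed copies for each full round, and a sliced partial last round.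
import Mathlib
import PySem

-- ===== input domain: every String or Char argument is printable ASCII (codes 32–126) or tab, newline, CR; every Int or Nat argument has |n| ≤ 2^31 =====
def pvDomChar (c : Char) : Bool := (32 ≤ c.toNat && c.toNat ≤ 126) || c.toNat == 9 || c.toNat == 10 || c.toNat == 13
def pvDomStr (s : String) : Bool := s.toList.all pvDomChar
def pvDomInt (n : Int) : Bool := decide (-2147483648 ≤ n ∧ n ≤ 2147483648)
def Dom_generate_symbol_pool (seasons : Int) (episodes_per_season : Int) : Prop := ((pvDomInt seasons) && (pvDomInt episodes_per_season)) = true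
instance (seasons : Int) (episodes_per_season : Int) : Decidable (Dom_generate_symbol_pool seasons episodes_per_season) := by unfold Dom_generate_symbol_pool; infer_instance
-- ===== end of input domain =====

-- B builds the pool round by round (bare round, full suffixed rounds, partial round) instead of one flat i%n / i//n loop; objective: alternative decomposition.

-- ===== PORT A =====
def SYMBOL_SETS : PySem.Dict String (List String) := PySem.Dict.ofList [
  ("encryption", ["CIPHER", "ENCRYPT", "HASH", "TOKEN", "KEY", "SALT",
                  "AES", "RSA", "TLS", "SSL", "PKI", "CERT"]),
  ("security", ["FIREWALL", "SHIELD", "GUARD", "SENTINEL", "BASTION", "FORTRESS",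
                "AEGIS", "BARRIER", "DEFENSE", "PATROL", "WATCH", "VAULT"]),
  ("attack", ["BREACH", "EXPLOIT", "PAYLOAD", "VECTOR", "MALWARE", "PHISH",
              "TROJAN", "WORM", "ROOTKIT", "BACKDOOR", "INJECT", "OVERFLOW"]),
  ("network", ["PACKET", "ROUTER", "GATEWAY", "PROXY", "TUNNEL", "BRIDGE",
               "NODE", "MESH", "FABRIC", "LINK", "HUB", "SWITCH"]),
  ("data", ["STREAM", "BUFFER", "CACHE", "QUEUE", "STACK", "HEAP",
            "BLOCK", "CHUNK", "SHARD", "FRAME", "SEGMENT", "BYTE"]),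
  ("protocol", ["HTTP", "TCP", "UDP", "DNS", "DHCP", "FTP",
                "SMTP", "SSH", "SNMP", "ICMP", "BGP", "OSPF"]),
  ("operation", ["SCAN", "PROBE", "TRACE", "QUERY", "FETCH", "PUSH",
                 "PULL", "MERGE", "FORK", "CLONE", "PATCH", "BUILD"]),
  ("status", ["ACTIVE", "IDLE", "READY", "ARMED", "ALERT", "LOCKED",
              "SECURE", "OPEN", "CLOSED", "PENDING", "LIVE", "STANDBY"])]

def generate_symbol_pool (seasons : Int) (episodes_per_season : Int) : List String :=
  let total_episodes : Int := seasons * episodes_per_season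
  -- flatten all symbols into a single list
  let all_symbols0 : List String :=
    (PySem.Dict.values SYMBOL_SETS).foldl (fun acc category_symbols => acc ++ category_symbols) []
  -- remove duplicates and sort
  let all_symbols : List String :=
    PySem.List.sorted (PySem.Set.ofList all_symbols0) (fun x => x) false
  if total_episodes > (all_symbols.length : Int) then
    (PySem.List.pyRange 0 total_episodes 1).foldl (fun symbol_pool i =>
      let base_symbol := PySem.List.pyGetD all_symbols (PySem.Int.mod i (all_symbols.length : Int)) ""
      let suffix_num := PySem.Int.floordiv i (all_symbols.length : Int)
      if suffix_num > 0 then symbol_pool ++ [base_symbol ++ PySem.Int.toStr suffix_num]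
      else symbol_pool ++ [base_symbol]) []
  else
    PySem.List.slice all_symbols none (some total_episodes)

-- ===== PORT B =====
def generate_symbol_pool_alt (seasons : Int) (episodes_per_season : Int) : List String :=
  let total : Int := seasons * episodes_per_season
  let all_symbols : List String :=
    PySem.List.sorted
      (PySem.Set.ofList ((PySem.Dict.values SYMBOL_SETS).flatMap (fun syms => syms)))
      (fun x => x) false
  let n : Int := (all_symbols.length : Int)
  if total ≤ n then
    PySem.List.slice all_symbols none (some total)
  else
    let full_rounds := PySem.Int.floordiv total n
    let rem := PySem.Int.mod total n
    let pool := all_symbols  -- round 0: bare symbols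
    let pool := (PySem.List.pyRange 1 full_rounds 1).foldl
      (fun p r => p ++ all_symbols.map (fun s => s ++ PySem.Int.toStr r)) pool
    pool ++ (PySem.List.slice all_symbols none (some rem)).map
      (fun s => s ++ PySem.Int.toStr full_rounds)

-- ===== PRECONDITION & SPEC =====
def Spec_generate_symbol_pool (seasons : Int) (episodes_per_season : Int) (out : List String) : Prop := out = generate_symbol_pool_alt seasons episodes_per_season
instance (seasons : Int) (episodes_per_season : Int) (out : List String) : Decidable (Spec_generate_symbol_pool seasons episodes_per_season out) := by unfold Spec_generate_symbol_pool; infer_instance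

-- ===== CLAIM (what is proved, stated in full; the proofs are below) =====
def Claim_equal_generate_symbol_pool : Prop := ∀ (seasons : Int) (episodes_per_season : Int), Dom_generate_symbol_pool seasons episodes_per_season → Spec_generate_symbol_pool seasons episodes_per_season (generate_symbol_pool seasons episodes_per_season)

-- ===== LEMMAS AND PROOFS =====

-- the sorted deduplicated symbol list both ports compute (A via foldl-extend, B via flatMap)
def pvSyms : List String :=
  PySem.List.sorted
    (PySem.Set.ofList ((PySem.Dict.values SYMBOL_SETS).flatMap (fun syms => syms)))
    (fun x => x) false

theorem pvSyms_A_eq :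
    PySem.List.sorted
      (PySem.Set.ofList
        ((PySem.Dict.values SYMBOL_SETS).foldl (fun acc cs => acc ++ cs) []))
      (fun x => x) false = pvSyms := by
  simp [pvSyms, PySem.List.foldl_append_eq_flatten, List.flatMap_def, List.map_id']

theorem pvSyms_ne_nil : pvSyms ≠ [] := by
  have hm : "ACTIVE" ∈ pvSyms := by
    rw [pvSyms, PySem.List.mem_sorted, PySem.Set.mem_ofList]
    decide
  exact List.ne_nil_of_mem hm

theorem pvSyms_len_pos : 0 < pvSyms.length :=
  List.length_pos_iff.mpr pvSyms_ne_nil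

-- (range L.length).map (getD · d) = L
theorem map_getD_range {α : Type} (L : List α) (d : α) :
    (List.range L.length).map (fun j => L.getD j d) = L := by
  apply List.ext_getElem
  · simp
  · intro i h1 h2
    simp [List.getD_eq_getElem?_getD, List.getElem?_eq_getElem h2]

-- prefix version: (range r).map (getD · d) = L.take r for r ≤ L.length
theorem map_getD_range_take {α : Type} (L : List α) (d : α) (r : Nat) (hr : r ≤ L.length) :
    (List.range r).map (fun j => L.getD j d) = L.take r := by
  apply List.ext_getElem
  · simp [hr]
  · intro i h1 h2
    simp at h1
    simp [List.getD_eq_getElem?_getD, List.getElem?_eq_getElem (lt_of_lt_of_le h1 hr)]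

-- decomposition of a flat i/n, i%n traversal into full rounds
theorem rounds_decomp {α : Type} (n : Nat) (hn : 0 < n) (G : Nat → Nat → α) (q : Nat) :
    (List.range (q * n)).map (fun k => G (k / n) (k % n)) =
      (List.range q).flatMap (fun a => (List.range n).map (fun j => G a j)) := by
  induction q with
  | zero => simp
  | succ q ih =>
    have h1 : (q + 1) * n = q * n + n := by ring
    rw [h1, List.range_add, List.map_append, List.map_map, ih, List.range_succ,
        List.flatMap_append]
    congr 1
    simp only [List.flatMap_cons, List.flatMap_nil, List.append_nil]
    apply List.map_congr_left
    intro j hj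
    simp only [List.mem_range] at hj
    have hd : (q * n + j) / n = q := by
      rw [Nat.mul_comm q n, Nat.mul_add_div hn, Nat.div_eq_of_lt hj]
      omega
    have hm : (q * n + j) % n = j := by
      rw [Nat.mul_comm q n, Nat.mul_add_mod, Nat.mod_eq_of_lt hj]
    simp [Function.comp, hd, hm]


-- the main combinatorial fact, over Nat: a flat k/n,k%n traversal of q*n+r indices
-- equals round 0 bare, rounds 1..q-1 suffixed, and a partial round q of length r
theorem rounds_full (L : List String) (d : String) (F : Nat → String) (q r : Nat)
    (hn : 0 < L.length) (hq : 1 ≤ q) (hr : r ≤ L.length) :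
    (List.range (q * L.length + r)).map
        (fun k => if 0 < k / L.length
                  then L.getD (k % L.length) d ++ F (k / L.length)
                  else L.getD (k % L.length) d)
      = (L ++ (List.range (q - 1)).flatMap (fun a => L.map (fun s => s ++ F (a + 1)))) ++
        (L.take r).map (fun s => s ++ F q) := by
  obtain ⟨m, rfl⟩ : ∃ m, q = m + 1 := ⟨q - 1, by omega⟩
  have hdec := rounds_decomp L.length hn
    (fun a j => if 0 < a then L.getD j d ++ F a else L.getD j d) (m + 1)
  simp only [] at hdec
  rw [List.range_add, List.map_append, List.map_map, hdec]
  congr 1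
  · -- full rounds: round 0 is L, round a+1 is L suffixed by F (a+1)
    rw [List.range_succ_eq_map, List.flatMap_cons, List.flatMap_map]
    simp only [Nat.add_sub_cancel]
    congr 1
    · simpa using map_getD_range L d
    · apply List.flatMap_congr
      intro a _
      conv_rhs => rw [← map_getD_range L d, List.map_map]
      apply List.map_congr_left
      intro j _
      simp [Function.comp]
  · -- partial round
    rw [← map_getD_range_take L d r hr, List.map_map]
    apply List.map_congr_left
    intro j hj
    simp only [List.mem_range] at hj
    have hj' : j < L.length := lt_of_lt_of_le hj hr
    have hd : ((m + 1) * L.length + j) / L.length = m + 1 := by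
      rw [Nat.mul_comm, Nat.mul_add_div hn, Nat.div_eq_of_lt hj']
    have hm : ((m + 1) * L.length + j) % L.length = j := by
      rw [Nat.mul_comm, Nat.mul_add_mod, Nat.mod_eq_of_lt hj']
    simp [Function.comp, hd, hm]

-- 'if p: out.append(f(x)) else: out.append(g(x))' as a single map
theorem foldl_if_append {α β : Type} (p : α → Prop) [DecidablePred p] (f g : α → β)
    (l : List α) (acc : List β) :
    l.foldl (fun a x => if p x then a ++ [f x] else a ++ [g x]) acc
      = acc ++ l.map (fun x => if p x then f x else g x) := by
  induction l generalizing acc with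
  | nil => simp
  | cons x xs ih => simp only [List.foldl_cons, List.map_cons]; split_ifs <;> simp [ih]

-- the big branch (total > n): A's flat loop equals B's round-by-round construction
theorem branch_eq (t' : Nat) (h : pvSyms.length < t') :
    (PySem.List.pyRange 0 (t' : Int) 1).foldl (fun symbol_pool i =>
        if PySem.Int.floordiv i (pvSyms.length : Int) > 0
        then symbol_pool ++ [PySem.List.pyGetD pvSyms (PySem.Int.mod i (pvSyms.length : Int)) "" ++
               PySem.Int.toStr (PySem.Int.floordiv i (pvSyms.length : Int))]
        else symbol_pool ++ [PySem.List.pyGetD pvSyms (PySem.Int.mod i (pvSyms.length : Int)) ""]) []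
    = ((PySem.List.pyRange 1 (PySem.Int.floordiv (t' : Int) (pvSyms.length : Int)) 1).foldl
        (fun p r => p ++ pvSyms.map (fun s => s ++ PySem.Int.toStr r)) pvSyms) ++
      (PySem.List.slice pvSyms none (some (PySem.Int.mod (t' : Int) (pvSyms.length : Int)))).map
        (fun s => s ++ PySem.Int.toStr (PySem.Int.floordiv (t' : Int) (pvSyms.length : Int))) := by
  have hn : 0 < pvSyms.length := pvSyms_len_pos
  have hq1 : 1 ≤ t' / pvSyms.length := (Nat.one_le_div_iff hn).mpr (le_of_lt h)
  have hfd : PySem.Int.floordiv (t' : Int) (pvSyms.length : Int)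
      = ((t' / pvSyms.length : Nat) : Int) := PySem.Int.floordiv_natCast _ _
  have hmd : PySem.Int.mod (t' : Int) (pvSyms.length : Int)
      = ((t' % pvSyms.length : Nat) : Int) := PySem.Int.mod_natCast _ _
  rw [hfd, hmd, PySem.List.slice_to_natCast,
      foldl_if_append (fun i => PySem.Int.floordiv i (pvSyms.length : Int) > 0)
        (fun i => PySem.List.pyGetD pvSyms (PySem.Int.mod i (pvSyms.length : Int)) "" ++
            PySem.Int.toStr (PySem.Int.floordiv i (pvSyms.length : Int)))
        (fun i => PySem.List.pyGetD pvSyms (PySem.Int.mod i (pvSyms.length : Int)) ""),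
      PySem.List.foldl_append_eq_flatMap, PySem.List.pyRange_one, PySem.List.pyRange_one]
  have ht1 : (((t' / pvSyms.length : Nat) : Int) - 1).toNat = t' / pvSyms.length - 1 := by omega
  have ht0 : (((t' : Int) - 0)).toNat = t' := by omega
  rw [ht1, ht0, List.nil_append, List.map_map, List.flatMap_map]
  simp only [Function.comp_def, zero_add, PySem.Int.floordiv_natCast, PySem.Int.mod_natCast,
    PySem.List.pyGetD_natCast, gt_iff_lt, Int.natCast_pos,
    show ∀ a : ℕ, (1 : Int) + (a : Int) = ((a + 1 : ℕ) : Int) from fun a => by omega]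
  have htd : t' = t' / pvSyms.length * pvSyms.length + t' % pvSyms.length := by
    rw [Nat.mul_comm]
    exact (Nat.div_add_mod t' pvSyms.length).symm
  conv_lhs => rw [htd]
  exact rounds_full pvSyms "" (fun m => PySem.Int.toStr (m : Int)) (t' / pvSyms.length)
    (t' % pvSyms.length) hn hq1 (le_of_lt (Nat.mod_lt _ hn))

theorem ports_agree (seasons episodes_per_season : Int) :
    generate_symbol_pool seasons episodes_per_season
      = generate_symbol_pool_alt seasons episodes_per_season := by
  have hB : PySem.List.sorted
      (PySem.Set.ofList ((PySem.Dict.values SYMBOL_SETS).flatMap (fun syms => syms)))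
      (fun x => x) false = pvSyms := rfl
  simp only [generate_symbol_pool, generate_symbol_pool_alt, pvSyms_A_eq, hB]
  by_cases hle : seasons * episodes_per_season ≤ (pvSyms.length : Int)
  · rw [if_neg (by omega : ¬ seasons * episodes_per_season > (pvSyms.length : Int)), if_pos hle]
  · rw [if_pos (by omega : seasons * episodes_per_season > (pvSyms.length : Int)), if_neg hle]
    have hgt : (pvSyms.length : Int) < seasons * episodes_per_season := by omega
    have h0 : 0 ≤ seasons * episodes_per_season :=
      le_trans (Int.natCast_nonneg _) (le_of_lt hgt)
    obtain ⟨t', ht'⟩ := Int.eq_ofNat_of_zero_le h0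
    rw [ht']
    exact branch_eq t' (by rw [ht'] at hgt; exact_mod_cast hgt)

-- ===== VERDICT (by name: the statement is the Claim_ definition above) =====
theorem generate_symbol_pool_spec : Claim_equal_generate_symbol_pool := by
  intro s e _
  exact ports_agree s e
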